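-- pv_equiv track=rewrite | github.com/northcity/RealityLab | src/reality_detector/io.py | _find_first_numeric_column
-- ===== SOURCE A (Python) =====
-- from typing import Dict, List, Optional, Union
--
-- def _find_first_numeric_column(
--     rows: List[Dict[str, str]], fieldnames: List[str]
-- ) -> Optional[str]:
--     for field in fieldnames:
--         numeric_found = False
--         is_numeric_column = True
--         for row in rows:
--             raw_value = (row.get(field) or "").strip()
--             if not raw_value:
--                 continue
--             try:
--                 float(raw_value)
--                 numeric_found = True
--             except ValueError:
--                 is_numeric_column = False
--                 break
--         if is_numeric_column and numeric_found:
--             return field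
--     return None
-- ===== SOURCE B (Python) =====
-- from typing import Dict, List, Optional
--
--
-- def _find_first_numeric_column(
--     rows: List[Dict[str, str]], fieldnames: List[str]
-- ) -> Optional[str]:
--     # One row-major pass: per-field state [has_numeric, is_valid], then select.
--     state = {field: [False, True] for field in fieldnames}
--     for row in rows:
--         for field, st in state.items():
--             if not st[1]:
--                 continue
--             value = (row.get(field) or "").strip()
--             if not value:
--                 continue
--             try:
--                 float(value)
--                 st[0] = True
--             except ValueError:
--                 st[1] = False
--     for field in fieldnames:
--         st = state[field]  # every field was put into state above
--         if st[1] and st[0]: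
--             return field
--     return None
-- ===== Notes on version B (the rewrite author's own statement) =====
-- stated objective: alternative
-- what changed: Column-major scan with early return/break replaced by one row-major pass maintaining a per-field (has_numeric, is_valid) table, followed by a selection pass over fieldnames.
import Mathlib
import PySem

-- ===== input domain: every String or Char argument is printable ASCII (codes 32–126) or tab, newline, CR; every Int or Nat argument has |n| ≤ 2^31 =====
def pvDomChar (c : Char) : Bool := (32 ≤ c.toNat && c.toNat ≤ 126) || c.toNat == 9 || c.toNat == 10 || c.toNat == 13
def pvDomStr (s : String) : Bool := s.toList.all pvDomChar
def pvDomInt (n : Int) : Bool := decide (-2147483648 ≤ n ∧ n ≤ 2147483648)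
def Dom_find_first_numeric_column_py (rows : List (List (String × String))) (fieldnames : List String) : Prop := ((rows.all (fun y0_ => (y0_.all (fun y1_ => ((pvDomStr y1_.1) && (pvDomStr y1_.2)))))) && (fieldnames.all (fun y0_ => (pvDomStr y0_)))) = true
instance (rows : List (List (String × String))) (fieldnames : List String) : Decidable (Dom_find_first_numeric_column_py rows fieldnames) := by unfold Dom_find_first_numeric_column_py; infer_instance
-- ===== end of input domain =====

-- B replaces A's column-major scan (with break / early return) by one row-major pass over a
-- per-field (has_numeric, is_valid) table followed by a selection pass; same cost, return value proved equal.

-- ---- shared model of the builtin float(s) VALIDITY test (exact on the ASCII domain; hand-ported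
-- ---- since PySem has no float parser; only success/ValueError matters, never the float value).

-- consume digit ( digit | '_' digit )* after a first digit was consumed
def pvDigitsTail : List Char → List Char
  | '_' :: c :: cs => if c.isDigit then pvDigitsTail cs else '_' :: c :: cs
  | c :: cs => if c.isDigit then pvDigitsTail cs else c :: cs
  | [] => []

-- consume a Python digit group D := digit ( digit | '_' digit )* ; none if no leading digit
def pvDigitsRun : List Char → Option (List Char)
  | c :: cs => if c.isDigit then some (pvDigitsTail cs) else none
  | [] => none

-- after 'e'/'E': optional sign then a digit group consuming the whole rest
def pvExpOk (cs : List Char) : Bool :=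
  let cs' := match cs with
    | '+' :: r => r
    | '-' :: r => r
    | r => r
  match pvDigitsRun cs' with
  | some [] => true
  | _ => false

-- optional exponent, then end of string
def pvExpPart : List Char → Bool
  | [] => true
  | 'e' :: r => pvExpOk r
  | 'E' :: r => pvExpOk r
  | _ => false

-- D ['.' [D]] [exp] | '.' D [exp]
def pvMantissa (cs : List Char) : Bool :=
  match pvDigitsRun cs with
  | some r =>
    match r with
    | '.' :: r1 =>
      match pvDigitsRun r1 with
      | some r2 => pvExpPart r2
      | none => pvExpPart r1
    | r1 => pvExpPart r1
  | none =>
    match cs with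
    | '.' :: r =>
      match pvDigitsRun r with
      | some r2 => pvExpPart r2
      | none => false
    | _ => false

-- float(s) succeeds (True) / raises ValueError (False); exact on the ASCII domain
def pyFloatOk (s : String) : Bool :=
  let cs := PySem.Chars.strip s.toList
  let cs' := match cs with
    | '+' :: r => r
    | '-' :: r => r
    | r => r
  let low := cs'.map PySem.Chars.lowerChar
  if low = "inf".toList || low = "infinity".toList || low = "nan".toList then true
  else pvMantissa cs'

-- ===== PORT A =====
-- inner 'for row in rows' loop: carries numeric_found, breaks on a non-numeric value
def pvRowsLoopA (rows : List (List (String × String))) (field : String) (numeric_found : Bool) :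
    Bool × Bool :=
  match rows with
  | [] => (numeric_found, true)
  | row :: rest =>
    let raw_value := PySem.Str.strip (((PySem.Dict.mk row).get? field).getD "")
    if raw_value = "" then pvRowsLoopA rest field numeric_found
    else if pyFloatOk raw_value then pvRowsLoopA rest field true
    else (numeric_found, false)

def pvFieldsLoopA (rows : List (List (String × String))) : List String → Option String
  | [] => none
  | field :: rest =>
    let r := pvRowsLoopA rows field false
    if r.2 && r.1 then some field else pvFieldsLoopA rows rest

def find_first_numeric_column_py (rows : List (List (String × String))) (fieldnames : List String) : Option String :=
  pvFieldsLoopA rows fieldnames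

-- ===== PORT B =====
-- per-field state: (has_numeric, is_valid)
def pvCellB (row : List (String × String)) (field : String) : String :=
  PySem.Str.strip (((PySem.Dict.mk row).get? field).getD "")

-- body of B's inner 'for field, st in state.items()' update
def pvUpdB (row : List (String × String)) (field : String) (st : Bool × Bool) : Bool × Bool :=
  if st.2 = false then st
  else
    let value := pvCellB row field
    if value = "" then st
    else if pyFloatOk value then (true, st.2)
    else (st.1, false)

-- B's final selection loop (state[field] always hits: every field was inserted)
def pvSelectB (state : PySem.Dict String (Bool × Bool)) : List String → Option String
  | [] => none
  | field :: rest =>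
    let st := state.getD field (false, false)
    if st.2 && st.1 then some field else pvSelectB state rest

def find_first_numeric_column_py_alt (rows : List (List (String × String))) (fieldnames : List String) : Option String :=
  let state0 : PySem.Dict String (Bool × Bool) :=
    fieldnames.foldl (fun d field => d.insert field (false, true)) PySem.Dict.empty
  let state : PySem.Dict String (Bool × Bool) :=
    rows.foldl (fun st row => PySem.Dict.mk (st.items.map (fun p => (p.1, pvUpdB row p.1 p.2)))) state0
  pvSelectB state fieldnames

-- ===== PRECONDITION & SPEC =====
def Spec_find_first_numeric_column_py (rows : List (List (String × String))) (fieldnames : List String) (out : Option String) : Prop := out = find_first_numeric_column_py_alt rows fieldnames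
instance (rows : List (List (String × String))) (fieldnames : List String) (out : Option String) : Decidable (Spec_find_first_numeric_column_py rows fieldnames out) := by unfold Spec_find_first_numeric_column_py; infer_instance

-- ===== CLAIM (what is proved, stated in full; the proofs are below) =====
def Claim_equal_find_first_numeric_column_py : Prop := ∀ (rows : List (List (String × String))) (fieldnames : List String), Dom_find_first_numeric_column_py rows fieldnames → Spec_find_first_numeric_column_py rows fieldnames (find_first_numeric_column_py rows fieldnames)

-- ===== LEMMAS AND PROOFS =====

-- once invalid, the per-field fold never changes the state
theorem pvFold_invalid (f : String) (rows : List (List (String × String))) (x : Bool) :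
    rows.foldl (fun st row => pvUpdB row f st) (x, false) = (x, false) := by
  induction rows with
  | nil => rfl
  | cons r rs ih => simpa [pvUpdB] using ih

-- A's inner loop computes the same per-field fold as B
theorem pvRowsLoopA_eq_fold (f : String) (rows : List (List (String × String))) (nf : Bool) :
    pvRowsLoopA rows f nf = rows.foldl (fun st row => pvUpdB row f st) (nf, true) := by
  induction rows generalizing nf with
  | nil => rfl
  | cons r rs ih =>
    simp only [pvRowsLoopA, List.foldl_cons]
    by_cases h0 : PySem.Str.strip (((PySem.Dict.mk r).get? f).getD "") = ""
    · rw [if_pos h0, show pvUpdB r f (nf, true) = (nf, true) from by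
        simp [pvUpdB, pvCellB, h0], ih]
    · by_cases h1 : pyFloatOk (PySem.Str.strip (((PySem.Dict.mk r).get? f).getD "")) = true
      · rw [if_neg h0, if_pos h1, show pvUpdB r f (nf, true) = (true, true) from by
          simp [pvUpdB, pvCellB, h0, h1], ih]
      · rw [if_neg h0, if_neg h1, show pvUpdB r f (nf, true) = (nf, false) from by
          simp [pvUpdB, pvCellB, h0, h1], pvFold_invalid]

-- lookup in the constant-value initialisation loop
theorem pvGet_state0 (l : List String) (d : PySem.Dict String (Bool × Bool)) (x : String) :
    (l.foldl (fun d f => d.insert f (false, true)) d).get? x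
      = if x ∈ l then some (false, true) else d.get? x := by
  induction l generalizing d with
  | nil => simp
  | cons f fs ih =>
    simp only [List.foldl_cons, ih, PySem.Dict.get?_insert, List.mem_cons]
    by_cases hm : x ∈ fs
    · simp [hm]
    · by_cases he : x = f <;> simp [hm, he]

-- one mapped-items step, seen through get?
theorem pvGet_mapStep (l : List (String × (Bool × Bool))) (row : List (String × String)) (x : String) :
    (PySem.Dict.mk (l.map (fun p => (p.1, pvUpdB row p.1 p.2)))).get? x
      = ((PySem.Dict.mk l).get? x).map (pvUpdB row x) := by
  induction l with
  | nil => simp [PySem.Dict.get?]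
  | cons p ps ih =>
    obtain ⟨k, st⟩ := p
    simp only [List.map_cons, PySem.Dict.get?_mk_cons]
    by_cases h : (k == x) = true
    · have hk : k = x := by simpa using h
      subst hk; simp
    · simp [h, ih]

-- lookup in the final state = per-field fold of the initial lookup
theorem pvGet_final (rows : List (List (String × String))) (d : PySem.Dict String (Bool × Bool)) (x : String) :
    (rows.foldl (fun st row => PySem.Dict.mk (st.items.map (fun p => (p.1, pvUpdB row p.1 p.2)))) d).get? x
      = Option.map (fun st0 => rows.foldl (fun st row => pvUpdB row x st) st0) (d.get? x) := by
  induction rows generalizing d with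
  | nil => cases hx : d.get? x <;> simp [hx]
  | cons r rs ih =>
    simp only [List.foldl_cons, ih]
    have hstep : (PySem.Dict.mk ((d.items).map (fun p => (p.1, pvUpdB r p.1 p.2)))).get? x
        = (d.get? x).map (pvUpdB r x) := by
      have := pvGet_mapStep d.items r x
      simpa using this
    rw [hstep]
    cases hx : d.get? x <;> simp

-- the two selection loops agree for fields drawn from the initialised key set
theorem pvSelect_eq (rows : List (List (String × String))) (fieldnames : List String)
    (fl : List String) (hsub : ∀ f ∈ fl, f ∈ fieldnames) :
    pvFieldsLoopA rows fl
      = pvSelectB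
          (rows.foldl (fun st row => PySem.Dict.mk (st.items.map (fun p => (p.1, pvUpdB row p.1 p.2))))
            (fieldnames.foldl (fun d field => d.insert field (false, true)) PySem.Dict.empty))
          fl := by
  induction fl with
  | nil => rfl
  | cons f fs ih =>
    have hf : f ∈ fieldnames := hsub f (List.mem_cons_self ..)
    have hget :
        (rows.foldl (fun st row => PySem.Dict.mk (st.items.map (fun p => (p.1, pvUpdB row p.1 p.2))))
            (fieldnames.foldl (fun d field => d.insert field (false, true)) PySem.Dict.empty)).get? f
          = some (rows.foldl (fun st row => pvUpdB row f st) (false, true)) := by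
      rw [pvGet_final, pvGet_state0]
      simp [hf]
    simp only [pvFieldsLoopA, pvSelectB, PySem.Dict.getD_eq_get?_getD, hget, Option.getD_some,
      pvRowsLoopA_eq_fold]
    by_cases hc : ((rows.foldl (fun st row => pvUpdB row f st) (false, true)).2
        && (rows.foldl (fun st row => pvUpdB row f st) (false, true)).1) = true
    · simp [hc]
    · simp only [hc, if_false, Bool.false_eq_true]
      exact ih (fun g hg => hsub g (List.mem_cons_of_mem _ hg))

-- ===== VERDICT (by name: the statement is the Claim_ definition above) =====
theorem find_first_numeric_column_py_spec : Claim_equal_find_first_numeric_column_py := by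
  intro rows fieldnames _
  unfold Spec_find_first_numeric_column_py find_first_numeric_column_py find_first_numeric_column_py_alt
  exact pvSelect_eq rows fieldnames fieldnames (fun _ h => h)
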